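-- pv_equiv track=rewrite | github.com/ChenYuxuanNPU/2025.11.07 | func.py | convert_to_frequency_dict
-- ===== SOURCE A (Python) =====
-- from collections import Counter
--
-- def convert_to_frequency_dict(letter_list: list, max_letter: str = None) -> dict:
--     """
--     将大写字母列表转换为带顺序的字典，且补全中间缺漏的大写字母
--     :param letter_list: 原大写字母列表
--     :param max_letter: 最大的选项序号
--     :return: 频数字典，键为字母，值为频数
--     """
--     if not letter_list:  # 处理空列表情况
--         return {}
--
--     # 找到列表中最大的字母
--     if max_letter is None:
--         max_letter = max(letter_list)
--
--     # 统计频数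
--     counter = Counter(letter_list)
--
--     # 生成从A到最大字母的字典
--     result = {}
--     for ascii_code in range(65, ord(max_letter) + 1):
--         letter = chr(ascii_code)
--         result[letter] = counter.get(letter, 0)
--
--     return result
-- ===== SOURCE B (Python) =====
-- def convert_to_frequency_dict(letter_list: list, max_letter: str = None) -> dict:
--     """Sort-then-sweep: sort the list once, then one pointer sweep over the
--     sorted list yields each letter's frequency as a run length (no Counter,
--     no hash counting)."""
--     if not letter_list:
--         return {}
--     rest = sorted(letter_list)
--     if max_letter is None:
--         max_letter = rest[-1]
--     result = {}
--     i = 0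
--     n = len(rest)
--     for code in range(65, ord(max_letter) + 1):
--         ch = chr(code)
--         while i < n and rest[i] < ch:
--             i += 1
--         start = i
--         while i < n and rest[i] == ch:
--             i += 1
--         result[ch] = i - start
--     return result
-- ===== Notes on version B (the rewrite author's own statement) =====
-- stated objective: alternative
-- what changed: B replaces A's Counter-based hash counting by sort-then-sweep: it sorts the list once and then a single pointer sweep over the sorted list yields each letter's frequency as a run length, so no Counter and no per-letter lookup exist at all.
import Mathlib
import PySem

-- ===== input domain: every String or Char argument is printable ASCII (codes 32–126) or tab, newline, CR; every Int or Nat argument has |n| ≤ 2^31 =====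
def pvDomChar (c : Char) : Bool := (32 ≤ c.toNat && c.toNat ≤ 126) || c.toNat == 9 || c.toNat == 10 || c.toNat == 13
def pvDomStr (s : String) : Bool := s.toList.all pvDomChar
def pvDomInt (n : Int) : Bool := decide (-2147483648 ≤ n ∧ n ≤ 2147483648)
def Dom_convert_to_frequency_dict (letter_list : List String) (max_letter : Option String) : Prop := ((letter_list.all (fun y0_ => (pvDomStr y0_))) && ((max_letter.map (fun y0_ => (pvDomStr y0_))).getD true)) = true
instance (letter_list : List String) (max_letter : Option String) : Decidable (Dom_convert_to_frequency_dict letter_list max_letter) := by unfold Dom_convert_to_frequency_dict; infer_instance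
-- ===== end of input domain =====

-- B replaces A's Counter-based hash counting by sort-then-sweep: sort the list once, then one
-- pointer sweep over the sorted list yields each letter's frequency as a run length (alternative
-- algorithm, similar cost).


-- shared primitives (Python's ord / chr, exact on the single-char / valid-codepoint cases both ports reach)
def pyOrd? (s : String) : Option Nat :=   -- ord(s): none exactly where Python raises TypeError (len(s) ≠ 1)
  match s.toList with
  | [c] => some c.toNat
  | _ => none

def pyChr (n : Int) : String :=           -- chr(n), exact for valid non-negative codepoints (here 65..126)
  String.ofList [Char.ofNat n.toNat]

-- ===== PORT A =====
def convert_to_frequency_dict (letter_list : List String) (max_letter : Option String) : List (String × Int) :=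
  if letter_list = [] then []
  else
    let m := match max_letter with
             | some s => s
             | none => (PySem.List.max? letter_list (fun x => x)).getD ""
    match pyOrd? m with
    | none => []   -- Python raises TypeError here; excluded by Pre_
    | some o =>
      let counter := PySem.Dict.counter letter_list
      ((PySem.List.pyRange 65 ((o : Int) + 1) 1).foldl
        (fun d code => d.insert (pyChr code) (counter.getD (pyChr code) 0))
        PySem.Dict.empty).items

-- ===== PORT B =====
-- 'while i < n and <cond on rest[i]>: i += 1' — the pointer-advancing while loop of Source B
def scanFrom (s : List String) (p : String → Bool) (i : Nat) : Nat :=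
  if h : i < s.length then
    if p s[i] then scanFrom s p (i + 1) else i
  else i
termination_by s.length - i

-- body of Source B's for-loop over the codes: advance the pointer past everything below ch,
-- measure the run of ch, record it
def sweepStep (s : List String) (st : Nat × PySem.Dict String Int) (code : Int) : Nat × PySem.Dict String Int :=
  let ch := pyChr code
  let i1 := scanFrom s (fun x => decide (x < ch)) st.1
  let i2 := scanFrom s (fun x => x == ch) i1
  (i2, st.2.insert ch ((i2 : Int) - (i1 : Int)))

def convert_to_frequency_dict_alt (letter_list : List String) (max_letter : Option String) : List (String × Int) :=
  if letter_list = [] then []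
  else
    let rest := PySem.List.sorted letter_list (fun x => x) false
    let m := match max_letter with
             | some s => s
             | none => (PySem.List.pyGet? rest (-1)).getD ""   -- rest[-1]; rest nonempty here
    match pyOrd? m with
    | none => []   -- Python raises TypeError here; excluded by Pre_
    | some o =>
      ((PySem.List.pyRange 65 ((o : Int) + 1) 1).foldl (sweepStep rest)
        (0, PySem.Dict.empty)).2.items

-- ===== PRECONDITION & SPEC =====
-- Pre_ excludes exactly the inputs where both Pythons raise TypeError in ord():
-- a non-empty list whose effective max_letter (the argument, or max(letter_list)) is not a single character.
def Pre_convert_to_frequency_dict (letter_list : List String) (max_letter : Option String) : Prop :=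
  letter_list = [] ∨
    (max_letter.getD ((PySem.List.max? letter_list (fun x => x)).getD "")).toList.length = 1
instance (letter_list : List String) (max_letter : Option String) : Decidable (Pre_convert_to_frequency_dict letter_list max_letter) := by unfold Pre_convert_to_frequency_dict; infer_instance

def pvWitness_convert_to_frequency_dict : List String × Option String := (["A", "C", "A"], some "C")

def Spec_convert_to_frequency_dict (letter_list : List String) (max_letter : Option String) (out : List (String × Int)) : Prop := out = convert_to_frequency_dict_alt letter_list max_letter
instance (letter_list : List String) (max_letter : Option String) (out : List (String × Int)) : Decidable (Spec_convert_to_frequency_dict letter_list max_letter out) := by unfold Spec_convert_to_frequency_dict; infer_instance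

-- ===== CLAIM (what is proved, stated in full; the proofs are below) =====
def Claim_equal_convert_to_frequency_dict : Prop := ∀ (letter_list : List String) (max_letter : Option String), Dom_convert_to_frequency_dict letter_list max_letter → Pre_convert_to_frequency_dict letter_list max_letter → Spec_convert_to_frequency_dict letter_list max_letter (convert_to_frequency_dict letter_list max_letter)

-- ===== LEMMAS AND PROOFS =====

-- the scan stops exactly at b when p holds, from position i on, exactly below b
theorem scanFrom_eq (s : List String) (p : String → Bool) (b : Nat) (hb : b ≤ s.length) :
    ∀ (n i : Nat), b - i = n → i ≤ b →
    (∀ j (hj : j < s.length), i ≤ j → (p s[j] = true ↔ j < b)) →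
    scanFrom s p i = b := by
  intro n
  induction n with
  | zero =>
    intro i hn hib hiff
    have hib' : i = b := by omega
    subst hib'
    rw [scanFrom]
    by_cases h : i < s.length
    · rw [dif_pos h, if_neg (fun h1 => absurd ((hiff i h le_rfl).mp h1) (lt_irrefl i))]
    · rw [dif_neg h]
  | succ n ih =>
    intro i hn hib hiff
    have hilt : i < b := by omega
    have hlen : i < s.length := lt_of_lt_of_le hilt hb
    rw [scanFrom, dif_pos hlen, if_pos ((hiff i hlen le_rfl).mpr hilt)]
    exact ih (i + 1) (by omega) (by omega) (fun j hj hij => hiff j hj (by omega))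

-- in a sorted list, a downward-closed property holds exactly on a prefix, of length countP
theorem sorted_countP_iff (s : List String) (hs : List.Pairwise (· ≤ ·) s)
    (q : String → Prop) [DecidablePred q] (hdc : ∀ x y : String, x ≤ y → q y → q x)
    (j : Nat) (hj : j < s.length) :
    q s[j] ↔ j < s.countP (fun x => decide (q x)) := by
  have hpg := List.pairwise_iff_getElem.mp hs
  constructor
  · intro hqj
    have hcnt : s.countP (fun x => decide (q x)) =
        (s.take (j + 1)).countP (fun x => decide (q x)) +
        (s.drop (j + 1)).countP (fun x => decide (q x)) := by
      conv_lhs => rw [← List.take_append_drop (j + 1) s]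
      exact List.countP_append
    have htake : (s.take (j + 1)).countP (fun x => decide (q x)) = (s.take (j + 1)).length := by
      rw [List.countP_eq_length]
      intro a ha
      obtain ⟨idx, hidx, ha'⟩ := List.mem_iff_getElem.mp ha
      have hidx' : idx < j + 1 := by
        have := hidx; rw [List.length_take] at this; omega
      rw [List.getElem_take] at ha'
      subst ha'
      simp only [decide_eq_true_eq]
      rcases Nat.lt_or_ge idx j with hlt | hge
      · exact hdc _ _ (hpg idx j (by omega) hj hlt) hqj
      · have : idx = j := by omega
        subst this; exact hqj
    have hlt : (s.take (j + 1)).length = j + 1 := by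
      rw [List.length_take]; omega
    omega
  · intro hcnt
    by_contra hq
    have hcnt2 : s.countP (fun x => decide (q x)) =
        (s.take j).countP (fun x => decide (q x)) +
        (s.drop j).countP (fun x => decide (q x)) := by
      conv_lhs => rw [← List.take_append_drop j s]
      exact List.countP_append
    have hdrop : (s.drop j).countP (fun x => decide (q x)) = 0 := by
      rw [List.countP_eq_zero]
      intro a ha
      obtain ⟨idx, hidx, ha'⟩ := List.mem_iff_getElem.mp ha
      have hidx2 : j + idx < s.length := by
        have := hidx; rw [List.length_drop] at this; omega
      rw [List.getElem_drop] at ha'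
      subst ha'
      simp only [decide_eq_true_eq]
      intro hqa
      rcases Nat.eq_zero_or_pos idx with h0 | hpos
      · subst h0; simp only [Nat.add_zero] at hqa; exact hq hqa
      · exact hq (hdc _ _ (hpg j (j + idx) hj hidx2 (by omega)) hqa)
    have htk : (s.take j).countP (fun x => decide (q x)) ≤ j := by
      calc (s.take j).countP (fun x => decide (q x)) ≤ (s.take j).length := List.countP_le_length
        _ ≤ j := by rw [List.length_take]; omega
    omega

-- countP (≤ ch) splits as countP (< ch) plus the multiplicity of ch
theorem countP_le_split (s : List String) (ch : String) :
    s.countP (fun x => decide (x ≤ ch)) = s.countP (fun x => decide (x < ch)) + s.count ch := by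
  induction s with
  | nil => rfl
  | cons a t ih =>
    simp only [List.countP_cons, List.count_cons, ih]
    by_cases hae : a = ch
    · subst hae
      simp
      omega
    · by_cases hal : a < ch
      · simp [le_of_lt hal, hal, hae, beq_iff_eq]
        omega
      · have hnle : ¬ a ≤ ch := fun hle => hae (le_antisymm hle (not_lt.mp hal))
        simp [hnle, hal, hae, beq_iff_eq]

-- chr is strictly monotone on codes 65..126
theorem pyChr_mono {a b : Int} (h65 : 65 ≤ a) (hab : a < b) (h126 : b ≤ 126) :
    pyChr a < pyChr b := by
  rw [String.lt_iff_toList_lt]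
  simp only [pyChr, String.toList_ofList]
  apply List.Lex.rel
  apply Char.lt_def.mpr
  have ha : (Char.ofNat a.toNat).toNat = a.toNat := by
    rw [Char.toNat_ofNat, if_pos]; left; omega
  have hb : (Char.ofNat b.toNat).toNat = b.toNat := by
    rw [Char.toNat_ofNat, if_pos]; left; omega
  have : (Char.ofNat a.toNat).toNat < (Char.ofNat b.toNat).toNat := by
    rw [ha, hb]; omega
  exact_mod_cast this

-- the key list A..max is duplicate-free (codepoints ≤ 126, where chr is injective)
theorem nodup_chr_range (o : Nat) (ho : o ≤ 126) :
    ((PySem.List.pyRange 65 ((o : Int) + 1) 1).map pyChr).Nodup := by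
  refine (PySem.List.nodup_pyRange_one 65 ((o : Int) + 1)).map_on ?_
  intro a ha b hb hab
  rw [PySem.List.mem_pyRange_one] at ha hb
  by_contra hne
  rcases Int.lt_or_lt_of_ne hne with h | h
  · exact absurd hab (ne_of_lt (pyChr_mono ha.1 h (by omega)))
  · exact absurd hab.symm (ne_of_lt (pyChr_mono hb.1 h (by omega)))

-- a string in the domain has all codepoints ≤ 126
theorem dom_str_chars (m : String) (h : pvDomStr m = true) : ∀ c ∈ m.toList, c.toNat ≤ 126 := by
  intro c hc
  have := (List.all_eq_true.mp h) c hc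
  simp [pvDomChar] at this
  omega

-- B's sweep: folding over codes lo..hi-1 with pointer i appends one run-length entry per code
theorem loop_items (s : List String) (hs : List.Pairwise (· ≤ ·) s) :
    ∀ (n : Nat) (lo hi : Int), (hi - lo).toNat = n → 65 ≤ lo → hi ≤ 127 →
    ∀ (i : Nat) (d : PySem.Dict String Int),
    (lo < hi → i ≤ s.countP (fun x => decide (x < pyChr lo))) →
    (∀ c : Int, lo ≤ c → c < hi → d.contains (pyChr c) = false) →
    ((PySem.List.pyRange lo hi 1).foldl (sweepStep s) (i, d)).2.items
    = d.items ++ (PySem.List.pyRange lo hi 1).map (fun c => (pyChr c, (s.count (pyChr c) : Int))) := by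
  intro n
  induction n with
  | zero =>
    intro lo hi hn h65 h127 i d hinv hfresh
    have hempty : PySem.List.pyRange lo hi 1 = [] := by
      apply List.eq_nil_iff_forall_not_mem.mpr
      intro x hx
      rw [PySem.List.mem_pyRange_one] at hx
      omega
    simp [hempty]
  | succ n ih =>
    intro lo hi hn h65 h127 i d hinv hfresh
    have hlt : lo < hi := by omega
    rw [PySem.List.pyRange_one_cons hlt, List.foldl_cons, List.map_cons]
    have hkk' : s.countP (fun x => decide (x < pyChr lo)) ≤ s.countP (fun x => decide (x ≤ pyChr lo)) :=
      List.countP_mono_left (fun x _ h => by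
        simp only [decide_eq_true_eq] at *; exact le_of_lt h)
    have hk'len : s.countP (fun x => decide (x ≤ pyChr lo)) ≤ s.length := List.countP_le_length
    -- first while loop: skip everything below ch
    have hi1 : scanFrom s (fun x => decide (x < pyChr lo)) i = s.countP (fun x => decide (x < pyChr lo)) := by
      refine scanFrom_eq s _ _ (le_trans hkk' hk'len) _ i rfl (hinv hlt) ?_
      intro j hj _
      simp only [decide_eq_true_eq]
      exact sorted_countP_iff s hs (fun x => x < pyChr lo) (fun x y hxy hy => lt_of_le_of_lt hxy hy) j hj
    -- second while loop: consume the run of ch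
    have hi2 : scanFrom s (fun x => x == pyChr lo) (s.countP (fun x => decide (x < pyChr lo)))
        = s.countP (fun x => decide (x ≤ pyChr lo)) := by
      refine scanFrom_eq s _ _ hk'len _ _ rfl hkk' ?_
      intro j hj hkj
      have hle := sorted_countP_iff s hs (fun x => x ≤ pyChr lo) (fun x y hxy hy => le_trans hxy hy) j hj
      have hlt' := sorted_countP_iff s hs (fun x => x < pyChr lo) (fun x y hxy hy => lt_of_le_of_lt hxy hy) j hj
      constructor
      · intro hbeq
        have : s[j] = pyChr lo := by simpa [beq_iff_eq] using hbeq
        exact hle.mp (le_of_eq this)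
      · intro hjk'
        have h1 : s[j] ≤ pyChr lo := hle.mpr hjk'
        have h2 : ¬ s[j] < pyChr lo := fun hl => absurd (hlt'.mp hl) (by omega)
        have : s[j] = pyChr lo := le_antisymm h1 (not_lt.mp h2)
        simpa [beq_iff_eq] using this
    have hsplit : s.countP (fun x => decide (x ≤ pyChr lo))
        = s.countP (fun x => decide (x < pyChr lo)) + s.count (pyChr lo) := countP_le_split s (pyChr lo)
    have hchfresh : d.contains (pyChr lo) = false := hfresh lo le_rfl hlt
    have hstep : sweepStep s (i, d) lo
        = (s.countP (fun x => decide (x ≤ pyChr lo)),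
           d.insert (pyChr lo) ((s.countP (fun x => decide (x ≤ pyChr lo)) : Int)
             - (s.countP (fun x => decide (x < pyChr lo)) : Int))) := by
      simp only [sweepStep]
      rw [hi1, hi2]
    rw [hstep, ih (lo + 1) hi (by omega) (by omega) h127 _ _ ?_ ?_]
    · rw [PySem.Dict.items_insert_of_not_contains _ _ hchfresh]
      have hval : ((s.countP (fun x => decide (x ≤ pyChr lo)) : Int)
          - (s.countP (fun x => decide (x < pyChr lo)) : Int)) = (s.count (pyChr lo) : Int) := by
        omega
      rw [hval]
      simp [List.append_assoc]
    · -- pointer invariant for the next code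
      intro hlt2
      have hmono : pyChr lo < pyChr (lo + 1) := pyChr_mono h65 (by omega) (by omega)
      refine le_trans (le_of_eq rfl) (List.countP_mono_left ?_)
      intro x _ hx
      simp only [decide_eq_true_eq] at *
      exact lt_of_le_of_lt hx hmono
    · -- freshness for the next codes
      intro c hc1 hc2
      have hne : pyChr c ≠ pyChr lo := by
        have : pyChr lo < pyChr c := pyChr_mono h65 (by omega) (by omega)
        exact (ne_of_lt this).symm
      rw [PySem.Dict.contains_insert]
      simp only [Bool.or_eq_false_iff]
      exact ⟨by simpa [beq_iff_eq] using hne, hfresh c (by omega) hc2⟩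

-- B's choice of max (last of the sorted list) is A's max(letter_list)
theorem last_sorted_eq_max (l : List String) (hne : l ≠ []) :
    (PySem.List.pyGet? (PySem.List.sorted l (fun x => x) false) (-1)).getD ""
      = (PySem.List.max? l (fun x => x)).getD "" := by
  have hsne : PySem.List.sorted l (fun x : String => x) false ≠ [] :=
    fun h => hne ((PySem.List.sorted_eq_nil_iff l _ false).mp h)
  have hslen : 0 < (PySem.List.sorted l (fun x : String => x) false).length :=
    List.length_pos_iff.mpr hsne
  obtain ⟨mx, hmx⟩ : ∃ mx, PySem.List.max? l (fun x : String => x) = some mx := by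
    cases h : PySem.List.max? l (fun x : String => x) with
    | none => exact absurd ((PySem.List.max?_eq_none_iff _ _).mp h) hne
    | some mx => exact ⟨mx, rfl⟩
  have hget : PySem.List.pyGet? (PySem.List.sorted l (fun x : String => x) false) (-1)
      = some (PySem.List.sorted l (fun x : String => x) false)[(PySem.List.sorted l (fun x : String => x) false).length - 1] := by
    simp only [PySem.List.pyGet?, PySem.List.pyIdx?]
    rw [if_neg (by omega), if_pos (by omega)]
    simp
  rw [hget, hmx]
  simp only [Option.getD_some]
  have hlast_mem : (PySem.List.sorted l (fun x : String => x) false)[(PySem.List.sorted l (fun x : String => x) false).length - 1] ∈ l :=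
    (PySem.List.mem_sorted l _ false _).mp (List.getElem_mem _)
  have h1 := PySem.List.max?_isMax hmx _ hlast_mem
  have hmx_mem_s : mx ∈ PySem.List.sorted l (fun x : String => x) false :=
    (PySem.List.mem_sorted l _ false mx).mpr (PySem.List.max?_mem hmx)
  obtain ⟨idx, hidx, hidx'⟩ := List.mem_iff_getElem.mp hmx_mem_s
  have h2 : mx ≤ (PySem.List.sorted l (fun x : String => x) false)[(PySem.List.sorted l (fun x : String => x) false).length - 1] := by
    rw [← hidx']
    exact PySem.List.sorted_id_getElem_mono l (by omega) (by omega)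
  exact le_antisymm h1 h2

-- core of the equivalence: with the effective max letter fixed (equal on the two sides), the bodies agree
theorem body_eq (letter_list : List String) (mA mB : String) (hAB : mA = mB) (c : Char)
    (hc : mA.toList = [c]) (h126 : c.toNat ≤ 126) :
    (match pyOrd? mA with
     | none => ([] : List (String × Int))
     | some o =>
       ((PySem.List.pyRange 65 ((o : Int) + 1) 1).foldl
         (fun (d : PySem.Dict String Int) code => d.insert (pyChr code) ((PySem.Dict.counter letter_list).getD (pyChr code) 0))
         PySem.Dict.empty).items)
    =
    (match pyOrd? mB with
     | none => []
     | some o =>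
       ((PySem.List.pyRange 65 ((o : Int) + 1) 1).foldl
          (sweepStep (PySem.List.sorted letter_list (fun x => x) false))
          (0, PySem.Dict.empty)).2.items) := by
  subst hAB
  have hord : pyOrd? mA = some c.toNat := by unfold pyOrd?; rw [hc]
  rw [hord]
  show ((PySem.List.pyRange 65 ((c.toNat : Int) + 1) 1).foldl
      (fun d code => d.insert (pyChr code) ((PySem.Dict.counter letter_list).getD (pyChr code) 0))
      (PySem.Dict.empty : PySem.Dict String Int)).items
    = ((PySem.List.pyRange 65 ((c.toNat : Int) + 1) 1).foldl
        (sweepStep (PySem.List.sorted letter_list (fun x => x) false))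
        (0, (PySem.Dict.empty : PySem.Dict String Int))).2.items
  set s := PySem.List.sorted letter_list (fun x : String => x) false with hsdef
  set R := PySem.List.pyRange 65 ((c.toNat : Int) + 1) 1 with hR
  have hfresh : ∀ a ∈ R, (PySem.Dict.empty : PySem.Dict String Int).contains (pyChr a) = false := by
    intro a _; simp
  have hnodup : (R.map pyChr).Nodup := nodup_chr_range c.toNat h126
  -- A's items: one pair per code, value = Counter multiplicity
  have hA : (R.foldl (fun d code => d.insert (pyChr code) ((PySem.Dict.counter letter_list).getD (pyChr code) 0)) PySem.Dict.empty).items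
      = R.map (fun code => (pyChr code, (letter_list.count (pyChr code) : Int))) := by
    rw [PySem.Dict.items_foldl_insert_fresh R pyChr
          (fun code => (PySem.Dict.counter letter_list).getD (pyChr code) 0)
          PySem.Dict.empty hfresh hnodup]
    simp [PySem.Dict.getD_counter, PySem.Dict.empty]
  -- B's items: one pair per code, value = run length in the sorted list
  have hsp : List.Pairwise (· ≤ ·) s := PySem.List.sorted_pairwise letter_list (fun x => x)
  have hB : ((R.foldl (sweepStep s) (0, PySem.Dict.empty)).2.items)
      = R.map (fun code => (pyChr code, (s.count (pyChr code) : Int))) := by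
    have := loop_items s hsp (((c.toNat : Int) + 1) - 65).toNat 65 ((c.toNat : Int) + 1) rfl
      (by omega) (by omega) 0 PySem.Dict.empty (fun _ => Nat.zero_le _) (fun _ _ _ => by simp)
    simpa using this
  rw [hA, hB]
  refine List.map_congr_left ?_
  intro code _
  have : s.count (pyChr code) = letter_list.count (pyChr code) :=
    (PySem.List.sorted_perm letter_list (fun x : String => x) false).count_eq _
  rw [this]

-- ===== VERDICT (by name: the statement is the Claim_ definition above) =====
theorem convert_to_frequency_dict_spec : Claim_equal_convert_to_frequency_dict := by
  intro letter_list max_letter hDom hPre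
  unfold Spec_convert_to_frequency_dict convert_to_frequency_dict convert_to_frequency_dict_alt
  by_cases hne : letter_list = []
  · simp [hne]
  · rw [if_neg hne, if_neg hne]
    unfold Dom_convert_to_frequency_dict at hDom
    simp only [Bool.and_eq_true, List.all_eq_true] at hDom
    obtain ⟨hlist, hopt⟩ := hDom
    rcases hPre with h | hlen
    · exact absurd h hne
    cases max_letter with
    | some s =>
      obtain ⟨c, hc⟩ : ∃ c, s.toList = [c] := by
        simp only [Option.getD_some] at hlen
        exact List.length_eq_one_iff.mp hlen
      have h126 : c.toNat ≤ 126 :=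
        dom_str_chars s (by simpa using hopt) c (by rw [hc]; exact List.mem_singleton.mpr rfl)
      exact body_eq letter_list s s rfl c hc h126
    | none =>
      have hmb : ((PySem.List.max? letter_list (fun x : String => x)).getD "")
          = (PySem.List.pyGet? (PySem.List.sorted letter_list (fun x => x) false) (-1)).getD "" :=
        (last_sorted_eq_max letter_list hne).symm
      obtain ⟨c, hc⟩ : ∃ c, ((PySem.List.max? letter_list (fun x : String => x)).getD "").toList = [c] := by
        simp only [Option.getD_none] at hlen
        exact List.length_eq_one_iff.mp hlen
      have hmdom : pvDomStr ((PySem.List.max? letter_list (fun x : String => x)).getD "") = true := by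
        cases hmax : PySem.List.max? letter_list (fun x : String => x) with
        | none => exact absurd ((PySem.List.max?_eq_none_iff _ _).mp hmax) hne
        | some s =>
          have hs : s ∈ letter_list := PySem.List.max?_mem hmax
          simpa using hlist s hs
      have h126 : c.toNat ≤ 126 :=
        dom_str_chars _ hmdom c (by rw [hc]; exact List.mem_singleton.mpr rfl)
      exact body_eq letter_list _ _ hmb c hc h126
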